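-- pv_equiv track=rewrite | github.com/katallen405/floortiler | floortiles-rectangle.py | generate_grid_edges
-- ===== SOURCE A (Python) =====
-- def generate_grid_edges(rows, cols):
--     """
--         Generate edges for a rows-by-cols grid where tiles alternate vertical/horizontal.
--         Tile 0 is horizontal, then tiles alternate in a checkerboard pattern.
--
--         Args:
--             rows: Number of rows in the grid
--             cols: Number of columns in the grid
--
--         Returns:
--             Dictionary with four edge lists
--         """
--     all_to_first = []
--     first_to_all = []
--     all_to_last = []
--     last_to_all = []
--
--     for row in range(rows):
--         for col in range(cols):
--             node = row * cols + col  # Changed from row * n + col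
--             is_vertical = (row + col) % 2 == 1
--
--             if is_vertical:
--                 # Right neighbor
--                 if col + 1 < cols:  # Changed from n
--                     neighbor = node + 1
--                     last_to_all.append([node, neighbor])
--
--                 # Left neighbor
--                 if col - 1 >= 0:
--                     neighbor = node - 1
--                     first_to_all.append([node, neighbor])
--
--                 # Top neighbor
--                 if row - 1 >= 0:
--                     neighbor = node - cols  # Changed from node - n
--                     all_to_last.append([node, neighbor])
--
--                 # Bottom neighbor
--                 if row + 1 < rows:  # Changed from n
--                     neighbor = node + cols  # Changed from node + n
--                     all_to_first.append([node, neighbor])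
--
--             else:
--                 # Right neighbor
--                 if col + 1 < cols:  # Changed from n
--                     neighbor = node + 1
--                     all_to_first.append([node, neighbor])
--
--                 # Left neighbor
--                 if col - 1 >= 0:
--                     neighbor = node - 1
--                     all_to_last.append([node, neighbor])
--
--                 # Top neighbor
--                 if row - 1 >= 0:
--                     neighbor = node - cols  # Changed from node - n
--                     first_to_all.append([node, neighbor])
--
--                 # Bottom neighbor
--                 if row + 1 < rows:  # Changed from n
--                     neighbor = node + cols  # Changed from node + n
--                     last_to_all.append([node, neighbor])
--
--     return {
--         'all_to_first': all_to_first,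
--         'first_to_all': first_to_all,
--         'all_to_last': all_to_last,
--         'last_to_all': last_to_all
--     }
-- ===== SOURCE B (Python) =====
-- def generate_grid_edges(rows, cols):
--     """Same result as A, but each edge list is built by its own row-major pass
--     using a generic per-cell edge selector (vertical-tile rule, horizontal-tile rule)."""
--     def collect(vert_edge, horiz_edge):
--         out = []
--         for r in range(rows):
--             for c in range(cols):
--                 n = r * cols + c
--                 e = vert_edge(r, c, n) if (r + c) % 2 == 1 else horiz_edge(r, c, n)
--                 if e is not None:
--                     out.append(e)
--         return out
--
--     down  = lambda r, c, n: [n, n + cols] if r + 1 < rows else None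
--     up    = lambda r, c, n: [n, n - cols] if r - 1 >= 0 else None
--     left  = lambda r, c, n: [n, n - 1]    if c - 1 >= 0 else None
--     right = lambda r, c, n: [n, n + 1]    if c + 1 < cols else None
--
--     return {
--         'all_to_first': collect(down, right),
--         'first_to_all': collect(left, up),
--         'all_to_last':  collect(up, left),
--         'last_to_all':  collect(right, down),
--     }
-- ===== Notes on version B (the rewrite author's own statement) =====
-- stated objective: simpler
-- what changed: B replaces A's single interleaved pass maintaining four accumulators and eight guarded branches with one generic per-cell collector parameterised by two edge-selector functions, called once per output list.
import Mathlib
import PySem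

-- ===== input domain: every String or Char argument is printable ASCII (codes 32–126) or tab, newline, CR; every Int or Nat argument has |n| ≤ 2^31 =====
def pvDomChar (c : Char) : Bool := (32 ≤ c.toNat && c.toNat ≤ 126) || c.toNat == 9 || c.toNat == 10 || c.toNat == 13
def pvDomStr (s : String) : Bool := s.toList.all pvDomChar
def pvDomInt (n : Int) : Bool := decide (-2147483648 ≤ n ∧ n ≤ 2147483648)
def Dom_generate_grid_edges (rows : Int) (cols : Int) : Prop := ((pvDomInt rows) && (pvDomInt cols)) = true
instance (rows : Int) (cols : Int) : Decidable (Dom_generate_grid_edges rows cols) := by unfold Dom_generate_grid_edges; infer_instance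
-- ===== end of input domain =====

-- B builds each of the four edge lists with its own pass through a generic per-cell
-- collector parameterised by two edge selectors, instead of A's single interleaved
-- pass over four accumulators; objective: simpler decomposition, same cost.

-- ===== PORT A =====
-- A-side helper: the body of A's inner loop for one cell (quadruple state
-- (all_to_first, first_to_all, all_to_last, last_to_all), appends in A's order).
def pvStepCellA (rows cols r : Int)
    (s : List (List Int) × List (List Int) × List (List Int) × List (List Int)) (c : Int) :
    List (List Int) × List (List Int) × List (List Int) × List (List Int) :=
  let n := r * cols + c
  if PySem.Int.mod (r + c) 2 == 1 then
    -- vertical tile: right → last_to_all, left → first_to_all, top → all_to_last, bottom → all_to_first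
    let s := if c + 1 < cols then (s.1, s.2.1, s.2.2.1, s.2.2.2 ++ [[n, n + 1]]) else s
    let s := if c - 1 ≥ 0 then (s.1, s.2.1 ++ [[n, n - 1]], s.2.2.1, s.2.2.2) else s
    let s := if r - 1 ≥ 0 then (s.1, s.2.1, s.2.2.1 ++ [[n, n - cols]], s.2.2.2) else s
    let s := if r + 1 < rows then (s.1 ++ [[n, n + cols]], s.2.1, s.2.2.1, s.2.2.2) else s
    s
  else
    -- horizontal tile: right → all_to_first, left → all_to_last, top → first_to_all, bottom → last_to_all
    let s := if c + 1 < cols then (s.1 ++ [[n, n + 1]], s.2.1, s.2.2.1, s.2.2.2) else s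
    let s := if c - 1 ≥ 0 then (s.1, s.2.1, s.2.2.1 ++ [[n, n - 1]], s.2.2.2) else s
    let s := if r - 1 ≥ 0 then (s.1, s.2.1 ++ [[n, n - cols]], s.2.2.1, s.2.2.2) else s
    let s := if r + 1 < rows then (s.1, s.2.1, s.2.2.1, s.2.2.2 ++ [[n, n + cols]]) else s
    s

def generate_grid_edges (rows : Int) (cols : Int) : List (String × List (List Int)) :=
  let s := (PySem.List.pyRange 0 rows 1).foldl
    (fun s r => (PySem.List.pyRange 0 cols 1).foldl (pvStepCellA rows cols r) s)
    ([], [], [], [])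
  [("all_to_first", s.1), ("first_to_all", s.2.1), ("all_to_last", s.2.2.1), ("last_to_all", s.2.2.2)]

-- ===== PORT B =====
-- B-side helper: 'if e is not None: out.append(e)' for one cell.
def pvOptAppend {α : Type} (out : List α) (e : Option α) : List α :=
  match e with
  | some x => out ++ [x]
  | none => out

-- B-side helper: one row-major pass collecting the selected edge of each cell.
def pvCollect (rows cols : Int) (ve he : Int → Int → Int → Option (List Int)) : List (List Int) :=
  (PySem.List.pyRange 0 rows 1).foldl
    (fun out r =>
      (PySem.List.pyRange 0 cols 1).foldl
        (fun out c =>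
          pvOptAppend out (if PySem.Int.mod (r + c) 2 == 1 then ve r c (r * cols + c)
                           else he r c (r * cols + c)))
        out)
    []

def generate_grid_edges_alt (rows : Int) (cols : Int) : List (String × List (List Int)) :=
  let down := fun (r : Int) (_ : Int) (n : Int) => if r + 1 < rows then some [n, n + cols] else none
  let up := fun (r : Int) (_ : Int) (n : Int) => if r - 1 ≥ 0 then some [n, n - cols] else none
  let left := fun (_ : Int) (c : Int) (n : Int) => if c - 1 ≥ 0 then some [n, n - 1] else none
  let right := fun (_ : Int) (c : Int) (n : Int) => if c + 1 < cols then some [n, n + 1] else none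
  [("all_to_first", pvCollect rows cols down right),
   ("first_to_all", pvCollect rows cols left up),
   ("all_to_last", pvCollect rows cols up left),
   ("last_to_all", pvCollect rows cols right down)]

-- ===== PRECONDITION & SPEC =====
def Spec_generate_grid_edges (rows : Int) (cols : Int) (out : List (String × List (List Int))) : Prop := out = generate_grid_edges_alt rows cols
instance (rows : Int) (cols : Int) (out : List (String × List (List Int))) : Decidable (Spec_generate_grid_edges rows cols out) := by unfold Spec_generate_grid_edges; infer_instance

-- ===== CLAIM (what is proved, stated in full; the proofs are below) =====
def Claim_equal_generate_grid_edges : Prop := ∀ (rows : Int) (cols : Int), Dom_generate_grid_edges rows cols → Spec_generate_grid_edges rows cols (generate_grid_edges rows cols)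

-- ===== LEMMAS AND PROOFS =====

-- per-cell contributions of A's pass, one function per output list
def cellATF (rows cols r c : Int) : List (List Int) :=
  let n := r * cols + c
  if PySem.Int.mod (r + c) 2 == 1 then (if r + 1 < rows then [[n, n + cols]] else [])
  else (if c + 1 < cols then [[n, n + 1]] else [])

def cellFTA (rows cols r c : Int) : List (List Int) :=
  let n := r * cols + c
  if PySem.Int.mod (r + c) 2 == 1 then (if c - 1 ≥ 0 then [[n, n - 1]] else [])
  else (if r - 1 ≥ 0 then [[n, n - cols]] else [])

def cellATL (rows cols r c : Int) : List (List Int) :=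
  let n := r * cols + c
  if PySem.Int.mod (r + c) 2 == 1 then (if r - 1 ≥ 0 then [[n, n - cols]] else [])
  else (if c - 1 ≥ 0 then [[n, n - 1]] else [])

def cellLTA (rows cols r c : Int) : List (List Int) :=
  let n := r * cols + c
  if PySem.Int.mod (r + c) 2 == 1 then (if c + 1 < cols then [[n, n + 1]] else [])
  else (if r + 1 < rows then [[n, n + cols]] else [])

theorem stepCellA_eq (rows cols r : Int) (a b d e : List (List Int)) (c : Int) :
    pvStepCellA rows cols r (a, b, d, e) c =
      (a ++ cellATF rows cols r c, b ++ cellFTA rows cols r c,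
       d ++ cellATL rows cols r c, e ++ cellLTA rows cols r c) := by
  simp only [pvStepCellA, cellATF, cellFTA, cellATL, cellLTA]
  split_ifs <;> simp

-- folding a quadruple state whose step is componentwise append equals four flatMaps
theorem foldl_quad {α β : Type} (step : (List α × List α × List α × List α) → β → (List α × List α × List α × List α))
    (k1 k2 k3 k4 : β → List α)
    (h : ∀ a b c d x, step (a, b, c, d) x = (a ++ k1 x, b ++ k2 x, c ++ k3 x, d ++ k4 x)) :
    ∀ (L : List β) (a b c d : List α),
      L.foldl step (a, b, c, d) =
        (a ++ L.flatMap k1, b ++ L.flatMap k2, c ++ L.flatMap k3, d ++ L.flatMap k4) := by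
  intro L
  induction L with
  | nil => simp
  | cons x L ih => intro a b c d; rw [List.foldl_cons, h, ih]; simp

-- folding an option-append step equals a flatMap of toList
theorem foldl_opt {α β : Type} (f : β → Option α) :
    ∀ (L : List β) (a : List α),
      L.foldl (fun out x => pvOptAppend out (f x)) a =
        a ++ L.flatMap (fun x => (f x).toList) := by
  intro L
  induction L with
  | nil => simp
  | cons x L ih =>
    intro a
    rw [List.foldl_cons, ih]
    cases hx : f x <;> simp [pvOptAppend, hx]

-- folding a list-append step equals a flatMap
theorem foldl_app {α β : Type} (step : List α → β → List α) (k : β → List α)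
    (h : ∀ s x, step s x = s ++ k x) :
    ∀ (L : List β) (a : List α), L.foldl step a = a ++ L.flatMap k := by
  intro L
  induction L with
  | nil => simp
  | cons x L ih => intro a; rw [List.foldl_cons, h, ih]; simp

theorem pvCollect_eq (rows cols : Int) (ve he : Int → Int → Int → Option (List Int)) :
    pvCollect rows cols ve he =
      (PySem.List.pyRange 0 rows 1).flatMap (fun r =>
        (PySem.List.pyRange 0 cols 1).flatMap (fun c =>
          (if PySem.Int.mod (r + c) 2 == 1 then ve r c (r * cols + c)
           else he r c (r * cols + c)).toList)) := by
  unfold pvCollect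
  rw [foldl_app _ (fun r => (PySem.List.pyRange 0 cols 1).flatMap (fun c =>
        (if PySem.Int.mod (r + c) 2 == 1 then ve r c (r * cols + c)
         else he r c (r * cols + c)).toList))]
  · simp
  · intro s r
    exact foldl_opt _ _ s

-- ===== VERDICT (by name: the statement is the Claim_ definition above) =====
theorem generate_grid_edges_spec : Claim_equal_generate_grid_edges := by
  intro rows cols _
  unfold Spec_generate_grid_edges generate_grid_edges generate_grid_edges_alt
  rw [foldl_quad (fun s r => (PySem.List.pyRange 0 cols 1).foldl (pvStepCellA rows cols r) s)
      (fun r => (PySem.List.pyRange 0 cols 1).flatMap (cellATF rows cols r))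
      (fun r => (PySem.List.pyRange 0 cols 1).flatMap (cellFTA rows cols r))
      (fun r => (PySem.List.pyRange 0 cols 1).flatMap (cellATL rows cols r))
      (fun r => (PySem.List.pyRange 0 cols 1).flatMap (cellLTA rows cols r))
      (fun a b c d r => foldl_quad (pvStepCellA rows cols r) _ _ _ _
        (fun a b c d x => stepCellA_eq rows cols r a b c d x) _ a b c d)]
  simp only [List.nil_append]
  rw [pvCollect_eq, pvCollect_eq, pvCollect_eq, pvCollect_eq]
  refine congrArg₂ _ (congrArg _ ?_) (congrArg₂ _ (congrArg _ ?_) (congrArg₂ _ (congrArg _ ?_) (congrArg₂ _ (congrArg _ ?_) rfl))) <;>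
    refine List.flatMap_congr (fun r _ => List.flatMap_congr (fun c _ => ?_)) <;>
      simp only [cellATF, cellFTA, cellATL, cellLTA] <;> split_ifs <;> simp
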